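-- pv_equiv track=rewrite | github.com/jackyiron/stockAdviserPython | stockPublicFunction.py | calculate_sign_changes
-- ===== SOURCE A (Python) =====
-- def calculate_sign_changes(data):
--     """计算符号变化，前面插入一个0，并对 None 值进行前向填充"""
--     # 前向填充 None 值
--     filled_data = []
--     last_valid = None
--     for value in data:
--         if value is None:
--             if last_valid is not None:
--                 filled_data.append(last_valid)
--             else:
--                 filled_data.append(0)  # 根据需求选择填充值，这里用0填充
--         else:
--             filled_data.append(value)
--             last_valid = value
--
--     """计算每个相邻数据点的差值，并在结果前面添加0"""
--     differences = [0]  # 添加0作为第一个元素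
--     for i in range(1, len(filled_data)):
--         diff = filled_data[i] - filled_data[i - 1]
--         differences.append(diff)
--
--
--     return differences
-- ===== SOURCE B (Python) =====
-- def calculate_sign_changes(data):
--     """Single fused pass: forward-fill and difference at once, never building filled_data."""
--     differences = [0]
--     last_valid = None
--     prev_filled = None
--     for value in data:
--         if value is not None:
--             filled = value
--             last_valid = value
--         elif last_valid is not None:
--             filled = last_valid
--         else:
--             filled = 0
--         if prev_filled is not None:
--             differences.append(filled - prev_filled)
--         prev_filled = filled
--     return differences
-- ===== Notes on version B (the rewrite author's own statement) =====
-- stated objective: simpler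
-- what changed: Fuses A's two passes (forward-fill into an intermediate filled_data list, then an index-based difference loop) into one direct pass over data that tracks last_valid and the previous filled value, never materialising filled_data and using no indexing.
import Mathlib
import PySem

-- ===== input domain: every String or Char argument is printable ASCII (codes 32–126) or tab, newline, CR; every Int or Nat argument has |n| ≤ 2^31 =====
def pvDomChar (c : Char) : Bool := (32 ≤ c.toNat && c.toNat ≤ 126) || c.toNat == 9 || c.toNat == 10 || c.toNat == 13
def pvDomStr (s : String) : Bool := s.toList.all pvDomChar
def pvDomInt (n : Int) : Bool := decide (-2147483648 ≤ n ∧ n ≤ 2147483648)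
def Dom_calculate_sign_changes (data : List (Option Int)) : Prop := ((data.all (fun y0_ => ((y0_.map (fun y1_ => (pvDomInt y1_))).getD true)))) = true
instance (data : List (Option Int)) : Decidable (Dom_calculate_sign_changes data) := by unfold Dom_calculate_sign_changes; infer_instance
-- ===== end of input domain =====

-- B fuses A's two passes (fill pass building filled_data, then an index-based difference
-- loop) into one direct pass over data; simpler, no intermediate list, no indexing.

-- ===== PORT A =====
-- A's first loop: state (filled_data, last_valid)
def csc_fillStep (st : List Int × Option Int) (value : Option Int) : List Int × Option Int :=
  match value with
  | none =>
    match st.2 with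
    | some lv => (st.1 ++ [lv], st.2)
    | none => (st.1 ++ [0], st.2)
  | some x => (st.1 ++ [x], some x)

def calculate_sign_changes (data : List (Option Int)) : List Int :=
  let filled := (data.foldl csc_fillStep ([], none)).1
  (PySem.List.pyRange 1 (filled.length : Int) 1).foldl
    (fun ds i => ds ++ [PySem.List.pyGetD filled i 0 - PySem.List.pyGetD filled (i - 1) 0])
    [0]

-- ===== PORT B =====
-- B's single fused loop: state (differences, last_valid, prev_filled)
def csc_altStep (st : List Int × Option Int × Option Int) (value : Option Int) :
    List Int × Option Int × Option Int :=
  let filled : Int :=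
    match value with
    | some x => x
    | none => match st.2.1 with | some lv => lv | none => 0
  let lv' : Option Int := match value with | some x => some x | none => st.2.1
  let ds' : List Int := match st.2.2 with | some p => st.1 ++ [filled - p] | none => st.1
  (ds', lv', some filled)

def calculate_sign_changes_alt (data : List (Option Int)) : List Int :=
  (data.foldl csc_altStep ([0], none, none)).1

-- ===== PRECONDITION & SPEC =====
def Spec_calculate_sign_changes (data : List (Option Int)) (out : List Int) : Prop := out = calculate_sign_changes_alt data
instance (data : List (Option Int)) (out : List Int) : Decidable (Spec_calculate_sign_changes data out) := by unfold Spec_calculate_sign_changes; infer_instance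

-- ===== CLAIM (what is proved, stated in full; the proofs are below) =====
def Claim_equal_calculate_sign_changes : Prop := ∀ (data : List (Option Int)), Dom_calculate_sign_changes data → Spec_calculate_sign_changes data (calculate_sign_changes data)

-- ===== LEMMAS AND PROOFS =====

-- the forward-filled value of one element
def csc_fillv (lv : Option Int) (v : Option Int) : Int :=
  match v with
  | some x => x
  | none => lv.getD 0

def csc_lvUpd (lv v : Option Int) : Option Int :=
  match v with
  | some x => some x
  | none => lv

-- the forward-filled list
def csc_fillList (lv : Option Int) : List (Option Int) → List Int
  | [] => []
  | v :: rest => csc_fillv lv v :: csc_fillList (csc_lvUpd lv v) rest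

-- adjacent differences of a list given the previous value
def csc_diffsFrom (p : Int) : List Int → List Int
  | [] => []
  | x :: rest => (x - p) :: csc_diffsFrom x rest

def csc_tailDiffs : List Int → List Int
  | [] => []
  | x :: rest => csc_diffsFrom x rest

theorem csc_fill_loop (data : List (Option Int)) (acc : List Int) (lv : Option Int) :
    data.foldl csc_fillStep (acc, lv) = (acc ++ csc_fillList lv data,
      data.foldl (fun s v => csc_lvUpd s v) lv) := by
  induction data generalizing acc lv with
  | nil => simp [csc_fillList]
  | cons v rest ih =>
    cases v with
    | none =>
      cases lv with
      | none => simp [csc_fillStep, csc_fillList, csc_fillv, csc_lvUpd, ih]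
      | some l => simp [csc_fillStep, csc_fillList, csc_fillv, csc_lvUpd, ih]
    | some x => simp [csc_fillStep, csc_fillList, csc_fillv, csc_lvUpd, ih]

theorem csc_diffsFrom_append (p x : Int) (l : List Int) :
    csc_diffsFrom p (l ++ [x]) = csc_diffsFrom p l ++ [x - l.getLastD p] := by
  induction l generalizing p with
  | nil => simp [csc_diffsFrom]
  | cons y rest ih =>
    simp only [List.cons_append, csc_diffsFrom, ih y, List.getLastD_cons]

theorem csc_tailDiffs_append (x : Int) (l : List Int) (h : l ≠ []) :
    csc_tailDiffs (l ++ [x]) = csc_tailDiffs l ++ [x - l.getLast h] := by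
  cases l with
  | nil => exact absurd rfl h
  | cons y rest =>
    simp [csc_tailDiffs, csc_diffsFrom_append, List.getLast_eq_getLastD]

-- A's second loop computes the adjacent differences of the filled list
theorem csc_range_loop (l : List Int) (acc : List Int) :
    (PySem.List.pyRange 1 (l.length : Int) 1).foldl
      (fun ds i => ds ++ [PySem.List.pyGetD l i 0 - PySem.List.pyGetD l (i - 1) 0]) acc
      = acc ++ csc_tailDiffs l := by
  induction l using List.reverseRecOn with
  | nil =>
    rw [show ((([]:List Int)).length : Int) = 0 by simp, PySem.List.pyRange_one_eq_nil (by omega)]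
    simp [csc_tailDiffs]
  | append_singleton l x ih =>
    rcases eq_or_ne l [] with rfl | h
    · rw [show (((([]:List Int) ++ [x])).length : Int) = 1 by simp,
         PySem.List.pyRange_one_eq_nil (by omega)]
      simp [csc_tailDiffs, csc_diffsFrom]
    · have hn : 1 ≤ (l.length : Int) := by
        have := List.length_pos_iff.mpr h; omega
      have hsplit : PySem.List.pyRange 1 ((l ++ [x]).length : Int) 1
          = PySem.List.pyRange 1 (l.length : Int) 1 ++ [(l.length : Int)] := by
        have : ((l ++ [x]).length : Int) = (l.length : Int) + 1 := by
          simp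
        rw [this, PySem.List.pyRange_one_succ_right (by omega)]
      rw [hsplit, List.foldl_append]
      have hcong : (PySem.List.pyRange 1 (l.length : Int) 1).foldl
          (fun ds i => ds ++ [PySem.List.pyGetD (l ++ [x]) i 0 - PySem.List.pyGetD (l ++ [x]) (i - 1) 0]) acc
          = (PySem.List.pyRange 1 (l.length : Int) 1).foldl
          (fun ds i => ds ++ [PySem.List.pyGetD l i 0 - PySem.List.pyGetD l (i - 1) 0]) acc := by
        apply PySem.List.foldl_congr_mem
        intro a i hi
        rw [PySem.List.mem_pyRange_one] at hi
        have h1 : PySem.List.pyGetD (l ++ [x]) i 0 = PySem.List.pyGetD l i 0 := by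
          rw [PySem.List.pyGetD_eq_getElem (l ++ [x]) 0 (by omega) (by simp; omega),
              PySem.List.pyGetD_eq_getElem l 0 (by omega) (by omega),
              List.getElem_append_left]
        have h2 : PySem.List.pyGetD (l ++ [x]) (i - 1) 0 = PySem.List.pyGetD l (i - 1) 0 := by
          rw [PySem.List.pyGetD_eq_getElem (l ++ [x]) 0 (by omega) (by simp; omega),
              PySem.List.pyGetD_eq_getElem l 0 (by omega) (by omega),
              List.getElem_append_left]
        rw [h1, h2]
      rw [hcong, ih, csc_tailDiffs_append x l h]
      have hlast : PySem.List.pyGetD (l ++ [x]) ((l.length : Int)) 0 = x := by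
        rw [PySem.List.pyGetD_eq_getElem (l ++ [x]) 0 (by omega) (by simp)]
        simp
      have hprev : PySem.List.pyGetD (l ++ [x]) ((l.length : Int) - 1) 0 = l.getLast h := by
        rw [PySem.List.pyGetD_eq_getElem (l ++ [x]) 0 (by omega)
          (by rw [List.length_append]; push_cast; omega)]
        have hlt : (((l.length : Int)) - 1).toNat < l.length := by omega
        rw [List.getElem_append_left hlt, List.getLast_eq_getElem]
        congr 1
        omega
      simp only [List.foldl_cons, List.foldl_nil]
      rw [hlast, hprev]
      simp

-- B's loop, once prev_filled is set, appends the differences of the filled rest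
theorem csc_alt_loop (data : List (Option Int)) (acc : List Int) (lv : Option Int) (p : Int) :
    (data.foldl csc_altStep (acc, lv, some p)).1
      = acc ++ csc_diffsFrom p (csc_fillList lv data) := by
  induction data generalizing acc lv p with
  | nil => simp [csc_fillList, csc_diffsFrom]
  | cons v rest ih =>
    cases v with
    | none =>
      cases lv with
      | none => simp [csc_altStep, csc_fillList, csc_fillv, csc_lvUpd, csc_diffsFrom, ih]
      | some l => simp [csc_altStep, csc_fillList, csc_fillv, csc_lvUpd, csc_diffsFrom, ih]
    | some x => simp [csc_altStep, csc_fillList, csc_fillv, csc_lvUpd, csc_diffsFrom, ih]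

-- ===== VERDICT (by name: the statement is the Claim_ definition above) =====
theorem calculate_sign_changes_spec : Claim_equal_calculate_sign_changes := by
  intro data _
  unfold Spec_calculate_sign_changes calculate_sign_changes calculate_sign_changes_alt
  have hA : (data.foldl csc_fillStep ([], none)).1 = csc_fillList none data := by
    rw [csc_fill_loop]; simp
  rw [hA, csc_range_loop]
  cases data with
  | nil => simp [csc_fillList, csc_tailDiffs]
  | cons v rest =>
    have hB : (rest.foldl csc_altStep ([0], csc_lvUpd none v, some (csc_fillv none v))).1
        = [0] ++ csc_diffsFrom (csc_fillv none v) (csc_fillList (csc_lvUpd none v) rest) :=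
      csc_alt_loop rest [0] (csc_lvUpd none v) (csc_fillv none v)
    cases v with
    | none =>
      simp only [List.foldl_cons]
      simp [csc_altStep, csc_fillList, csc_tailDiffs, csc_fillv, csc_lvUpd] at hB ⊢
      rw [hB]
    | some x =>
      simp only [List.foldl_cons]
      simp [csc_altStep, csc_fillList, csc_tailDiffs, csc_fillv, csc_lvUpd] at hB ⊢
      rw [hB]
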